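-- pv_equiv track=rewrite | github.com/mrjabka/-9- | Разминка/J. Квас.py | find_optimal_city
-- ===== SOURCE A (Python) =====
-- def find_optimal_city(N, demands):
--     min_cost = float('inf')
--     best_city = 0
--
--     for city in range(N):
--         cost = 0
--
--         for i in range(N):
--             distance = min(abs(city - i), N - abs(city - i))
--             cost += demands[i] * distance
--
--         if cost < min_cost:
--             min_cost = cost
--             best_city = city + 1  # город считая от 1
--
--     return best_city
-- ===== SOURCE B (Python) =====
-- def find_optimal_city(N, demands):
--     # O(N) incremental: cost(c+1) = cost(c) + total - 2*W(c) [- middle term for odd N],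
--     # where W(c) = sum of demands over the half-window (c+1 .. c+N//2) mod N, maintained by sliding.
--     if N <= 0:
--         return 0
--     n = N
--     d = demands[:n]
--     total = sum(d)
--     m = n // 2
--     cost = sum(d[i] * min(i, n - i) for i in range(n))
--     W = sum(d[r % n] for r in range(1, m + 1))
--     best_cost = cost
--     best_city = 1
--     for c in range(n - 1):
--         delta = total - 2 * W
--         if n % 2 == 1:
--             delta -= d[(c + m + 1) % n]
--         cost += delta
--         if cost < best_cost:
--             best_cost = cost
--             best_city = c + 2
--         W += d[(c + m + 1) % n] - d[(c + 1) % n]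
--     return best_city
-- ===== Notes on version B (the rewrite author's own statement) =====
-- stated objective: faster
-- what changed: A recomputes each candidate city's full circular-distance cost with a nested O(N) scan; B computes the cost of city 0 once and then updates it incrementally (cost(c+1) = cost(c) + total - 2*window - odd-middle term) while sliding a half-ring window sum, giving O(N) total.
import Mathlib
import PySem

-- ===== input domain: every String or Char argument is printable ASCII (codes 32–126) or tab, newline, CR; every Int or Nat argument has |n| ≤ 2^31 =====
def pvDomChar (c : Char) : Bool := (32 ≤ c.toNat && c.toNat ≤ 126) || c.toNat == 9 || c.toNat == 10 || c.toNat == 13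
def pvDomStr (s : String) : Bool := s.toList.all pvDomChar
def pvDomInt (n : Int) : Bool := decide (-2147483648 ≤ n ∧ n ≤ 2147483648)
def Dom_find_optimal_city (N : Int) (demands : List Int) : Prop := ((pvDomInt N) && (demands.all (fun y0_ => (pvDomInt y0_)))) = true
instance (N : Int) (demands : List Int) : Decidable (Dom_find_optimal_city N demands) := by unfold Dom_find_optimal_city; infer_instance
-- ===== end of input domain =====

-- B replaces A's O(N^2) nested scan by an O(N) incremental update of the circular-distance cost
-- (cost(c+1) = cost(c) + total - 2*window [- middle term for odd N]) with a sliding window sum.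

-- ===== PORT A =====
-- inner loop of A: cost accumulated over all cities i for a fixed candidate city
def pvInnerA (N : Int) (demands : List Int) (city : Int) : Int :=
  (PySem.List.pyRange 0 N 1).foldl
    (fun cost i => cost + PySem.List.pyGetD demands i 0 * min |city - i| (N - |city - i|)) 0
    -- demands[i]: pyGetD is exact under Pre_ (0 ≤ i < N ≤ len demands)

-- outer loop body: min_cost = float('inf') is the `none` state (any cost beats it)
def pvStepA (N : Int) (demands : List Int) (st : Option Int × Int) (city : Int) : Option Int × Int :=
  let cost := pvInnerA N demands city
  match st.1 with
  | none => (some cost, city + 1)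
  | some mc => if cost < mc then (some cost, city + 1) else st

def find_optimal_city (N : Int) (demands : List Int) : Int :=
  ((PySem.List.pyRange 0 N 1).foldl (pvStepA N demands) (none, 0)).2

-- ===== PORT B =====
-- loop body of Source B: state (cost, W, best_cost, best_city)
def pvStepB (n m total : Int) (d : List Int) (st : Int × Int × Int × Int) (c : Int) :
    Int × Int × Int × Int :=
  let cost := st.1
  let W := st.2.1
  let best_cost := st.2.2.1
  let best_city := st.2.2.2
  let delta := total - 2 * W
  let delta := if PySem.Int.mod n 2 == 1
    then delta - PySem.List.pyGetD d (PySem.Int.mod (c + m + 1) n) 0 else delta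
  let cost := cost + delta
  let bb := if cost < best_cost then (cost, c + 2) else (best_cost, best_city)
  let W := W + PySem.List.pyGetD d (PySem.Int.mod (c + m + 1) n) 0
             - PySem.List.pyGetD d (PySem.Int.mod (c + 1) n) 0
  (cost, W, bb.1, bb.2)

def find_optimal_city_alt (N : Int) (demands : List Int) : Int :=
  if N ≤ 0 then 0 else
  let n := N
  let d := PySem.List.slice demands none (some n)
  let total := d.sum
  let m := PySem.Int.floordiv n 2
  let cost := ((PySem.List.pyRange 0 n 1).map
    (fun i => PySem.List.pyGetD d i 0 * min i (n - i))).sum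
  let W := ((PySem.List.pyRange 1 (m + 1) 1).map
    (fun r => PySem.List.pyGetD d (PySem.Int.mod r n) 0)).sum
  (((PySem.List.pyRange 0 (n - 1) 1).foldl (pvStepB n m total d) (cost, W, cost, 1))).2.2.2

-- ===== PRECONDITION & SPEC =====
-- Pre_ excludes exactly the inputs where A raises IndexError: demands[i] with N > len(demands).
def Pre_find_optimal_city (N : Int) (demands : List Int) : Prop := N ≤ (demands.length : Int)
instance (N : Int) (demands : List Int) : Decidable (Pre_find_optimal_city N demands) := by
  unfold Pre_find_optimal_city; infer_instance
def pvWitness_find_optimal_city : Int × List Int := (3, [1, 2, 3])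

def Spec_find_optimal_city (N : Int) (demands : List Int) (out : Int) : Prop := out = find_optimal_city_alt N demands
instance (N : Int) (demands : List Int) (out : Int) : Decidable (Spec_find_optimal_city N demands out) := by unfold Spec_find_optimal_city; infer_instance

-- ===== CLAIM (what is proved, stated in full; the proofs are below) =====
def Claim_equal_find_optimal_city : Prop := ∀ (N : Int) (demands : List Int), Dom_find_optimal_city N demands → Pre_find_optimal_city N demands → Spec_find_optimal_city N demands (find_optimal_city N demands)

-- ===== LEMMAS AND PROOFS =====

-- cost of candidate city c written in rotated coordinates: distance profile r ↦ min(r, n−r)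
-- applied to the list rotated so that city c sits at position 0
def pvCostPhi (n : Nat) (e : List Int) : Int :=
  ∑ r ∈ Finset.range n, min (r : Int) ((n : Int) - r) * e.getD r 0

-- window sum: elements at positions 1..m of the rotated list
def pvWin (m : Nat) (e : List Int) : Int := ∑ j ∈ Finset.range m, e.getD (j + 1) 0

lemma pv_sum_map_range (f : Nat → Int) (n : Nat) :
    ((List.range n).map f).sum = ∑ r ∈ Finset.range n, f r := by
  induction n with
  | zero => simp
  | succ n ih => rw [List.range_succ, Finset.sum_range_succ]; simp [ih, Int.add_comm]

lemma pv_list_sum_eq (l : List Int) (n : Nat) (hn : l.length = n) :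
    l.sum = ∑ r ∈ Finset.range n, l.getD r 0 := by
  subst hn
  induction l with
  | nil => simp
  | cons x l ih =>
      rw [List.sum_cons, List.length_cons, Finset.sum_range_succ', ih]
      simp [Int.add_comm]

lemma pv_getD_rotate (l : List Int) (n c k : Nat) (hl : l.length = n) (hn : 1 ≤ n) (hk : k < n) :
    (l.rotate c).getD k 0 = l.getD ((k + c) % n) 0 := by
  subst hl
  rw [List.getD_eq_getElem _ _ (by simpa using hk),
      List.getD_eq_getElem _ _ (by exact Nat.mod_lt _ (by omega))]
  exact List.getElem_rotate l c k _
lemma pv_prof_step (n r : Nat) (_hr : r < n - 1) (_hn : 2 ≤ n) :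
    min (r:Int) ((n:Int) - r) - min ((r:Int)+1) ((n:Int) - ((r:Int)+1)) - 1
      = -(if r < n / 2 then (2:Int) else 0) - (if n % 2 = 1 ∧ r = n / 2 then (1:Int) else 0) := by
  split_ifs <;> omega

lemma pv_K2 (e : List Int) (n : Nat) (he : e.length = n) (hn : 2 ≤ n) :
    pvWin (n / 2) (e.rotate 1) =
      pvWin (n / 2) e + e.getD ((n / 2 + 1) % n) 0 - e.getD 1 0 := by
  have hm : n / 2 < n := by omega
  have h1 : pvWin (n / 2) (e.rotate 1)
      = ∑ j ∈ Finset.range (n / 2), e.getD (((j + 1) + 1) % n) 0 :=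
    Finset.sum_congr rfl (fun j hj => by
      rw [pv_getD_rotate e n 1 (j+1) he (by omega) (by have := Finset.mem_range.mp hj; omega)])
  have h2 : ∑ j ∈ Finset.range (n / 2 + 1), e.getD ((j + 1) % n) 0
      = ∑ j ∈ Finset.range (n / 2), e.getD (((j + 1) + 1) % n) 0 + e.getD (1 % n) 0 :=
    Finset.sum_range_succ' _ _
  have h3 : ∑ j ∈ Finset.range (n / 2 + 1), e.getD ((j + 1) % n) 0
      = ∑ j ∈ Finset.range (n / 2), e.getD ((j + 1) % n) 0 + e.getD ((n / 2 + 1) % n) 0 :=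
    Finset.sum_range_succ _ _
  have h4 : ∑ j ∈ Finset.range (n / 2), e.getD ((j + 1) % n) 0 = pvWin (n / 2) e :=
    Finset.sum_congr rfl (fun j hj => by
      rw [Nat.mod_eq_of_lt (by have := Finset.mem_range.mp hj; omega)])
  rw [Nat.mod_eq_of_lt (show 1 < n by omega)] at h2
  rw [h4] at h3
  rw [h1]
  linarith [h2, h3]

lemma pv_K1 (e : List Int) (n : Nat) (he : e.length = n) (hn : 2 ≤ n) :
    pvCostPhi n (e.rotate 1) =
      pvCostPhi n e + e.sum - 2 * pvWin (n / 2) e -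
        (if n % 2 = 1 then e.getD (n / 2 + 1) 0 else 0) := by
  obtain ⟨k, rfl⟩ : ∃ k, n = k + 1 := ⟨n - 1, by omega⟩
  have hk : 1 ≤ k := by omega
  set m := (k + 1) / 2 with hmdef
  have hmk : m ≤ k := by omega
  -- LHS in terms of a r := e.getD (r+1) 0
  have hrot : pvCostPhi (k+1) (e.rotate 1)
      = ∑ r ∈ Finset.range k, min (r:Int) (((k:Int)+1) - r) * e.getD (r+1) 0 + e.getD 0 0 := by
    unfold pvCostPhi
    rw [Finset.sum_range_succ]
    have h0 : ∀ r ∈ Finset.range k, min (r:Int) (((k+1:Nat):Int) - r) * (e.rotate 1).getD r 0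
        = min (r:Int) (((k:Int)+1) - r) * e.getD (r+1) 0 := by
      intro r hr
      have hrk := Finset.mem_range.mp hr
      rw [pv_getD_rotate e (k+1) 1 r he (by omega) (by omega), Nat.mod_eq_of_lt (by omega)]
      push_cast; ring_nf
    rw [Finset.sum_congr rfl h0,
        pv_getD_rotate e (k+1) 1 k he (by omega) (by omega), Nat.mod_self]
    have : min ((k:Int)) (((k+1:Nat):Int) - k) = 1 := by omega
    rw [this]; ring
  -- RHS pieces
  have hphi : pvCostPhi (k+1) e
      = ∑ r ∈ Finset.range k, min ((r:Int)+1) (((k:Int)+1) - ((r:Int)+1)) * e.getD (r+1) 0 := by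
    unfold pvCostPhi
    rw [Finset.sum_range_succ' _ k]
    have : min ((0:Nat):Int) (((k+1:Nat):Int) - ((0:Nat):Int)) * e.getD 0 0 = 0 := by
      push_cast; simp; omega
    rw [this, add_zero]
    refine Finset.sum_congr rfl (fun r hr => by push_cast; ring_nf)
  have hsum : e.sum = e.getD 0 0 + ∑ r ∈ Finset.range k, e.getD (r+1) 0 := by
    rw [pv_list_sum_eq e (k+1) he, Finset.sum_range_succ' _ k]; ring
  -- pointwise rewrite of LHS sum
  have key : ∑ r ∈ Finset.range k, min (r:Int) (((k:Int)+1) - r) * e.getD (r+1) 0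
      = ∑ r ∈ Finset.range k,
          ((min ((r:Int)+1) (((k:Int)+1) - ((r:Int)+1)) + 1
            - (if r < m then (2:Int) else 0)
            - (if (k+1) % 2 = 1 ∧ r = m then (1:Int) else 0)) * e.getD (r+1) 0) := by
    refine Finset.sum_congr rfl (fun r hr => ?_)
    have hrk := Finset.mem_range.mp hr
    have := pv_prof_step (k+1) r (by omega) (by omega)
    have h2 : min (r:Int) (((k:Int)+1) - r)
        = min ((r:Int)+1) (((k:Int)+1) - ((r:Int)+1)) + 1
          - (if r < m then (2:Int) else 0) - (if (k+1) % 2 = 1 ∧ r = m then (1:Int) else 0) := by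
      omega
    rw [h2]
  -- distribute
  have dist : ∑ r ∈ Finset.range k,
          ((min ((r:Int)+1) (((k:Int)+1) - ((r:Int)+1)) + 1
            - (if r < m then (2:Int) else 0)
            - (if (k+1) % 2 = 1 ∧ r = m then (1:Int) else 0)) * e.getD (r+1) 0)
      = ∑ r ∈ Finset.range k, min ((r:Int)+1) (((k:Int)+1) - ((r:Int)+1)) * e.getD (r+1) 0
        + ∑ r ∈ Finset.range k, e.getD (r+1) 0
        - ∑ r ∈ Finset.range k, (if r < m then (2:Int) else 0) * e.getD (r+1) 0
        - ∑ r ∈ Finset.range k, (if (k+1) % 2 = 1 ∧ r = m then (1:Int) else 0) * e.getD (r+1) 0 := by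
    have shape : ∀ r ∈ Finset.range k,
        ((min ((r:Int)+1) (((k:Int)+1) - ((r:Int)+1)) + 1
            - (if r < m then (2:Int) else 0)
            - (if (k+1) % 2 = 1 ∧ r = m then (1:Int) else 0)) * e.getD (r+1) 0)
        = ((min ((r:Int)+1) (((k:Int)+1) - ((r:Int)+1)) * e.getD (r+1) 0 + e.getD (r+1) 0)
            - (if r < m then (2:Int) else 0) * e.getD (r+1) 0)
            - (if (k+1) % 2 = 1 ∧ r = m then (1:Int) else 0) * e.getD (r+1) 0 :=
      fun r _ => by ring
    rw [Finset.sum_congr rfl shape, Finset.sum_sub_distrib, Finset.sum_sub_distrib,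
        Finset.sum_add_distrib]
  -- window sum
  have hwin : ∑ r ∈ Finset.range k, (if r < m then (2:Int) else 0) * e.getD (r+1) 0
      = 2 * pvWin m e := by
    unfold pvWin
    rw [Finset.mul_sum]
    rw [← Finset.sum_range_add_sum_Ico _ (show m ≤ k from hmk)]
    have h1 : ∑ r ∈ Finset.range m, (if r < m then (2:Int) else 0) * e.getD (r+1) 0
        = ∑ r ∈ Finset.range m, 2 * e.getD (r+1) 0 :=
      Finset.sum_congr rfl (fun r hr => by
        rw [if_pos (Finset.mem_range.mp hr)])
    have h2 : ∑ r ∈ Finset.Ico m k, (if r < m then (2:Int) else 0) * e.getD (r+1) 0 = 0 :=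
      Finset.sum_eq_zero (fun r hr => by
        rw [if_neg (by have := (Finset.mem_Ico.mp hr).1; omega)]; ring)
    rw [h1, h2, add_zero]
  -- middle term
  have hmid : ∑ r ∈ Finset.range k, (if (k+1) % 2 = 1 ∧ r = m then (1:Int) else 0) * e.getD (r+1) 0
      = (if (k+1) % 2 = 1 then e.getD (m + 1) 0 else 0) := by
    by_cases hodd : (k+1) % 2 = 1
    · rw [if_pos hodd]
      have hmlt : m < k := by omega
      rw [Finset.sum_eq_single_of_mem m (Finset.mem_range.mpr hmlt)
        (fun r hr hne => by rw [if_neg (by tauto)]; ring)]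
      rw [if_pos ⟨hodd, rfl⟩]; ring
    · rw [if_neg hodd]
      exact Finset.sum_eq_zero (fun r hr => by rw [if_neg (by tauto)]; ring)
  rw [hrot, key, dist, hwin, hmid, hphi, hsum]
  ring
lemma pv_innerA_eq (demands d : List Int) (n : Nat) (hn : 1 ≤ n)
    (hd : d = demands.take n) (hlen : n ≤ demands.length) (c : Nat) (hc : c < n) :
    pvInnerA (n : Int) demands (c : Int) = pvCostPhi n (d.rotate c) := by
  unfold pvInnerA
  rw [PySem.List.foldl_add, PySem.List.pyRange_one]
  simp only [sub_zero, Int.toNat_natCast, List.map_map]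
  rw [pv_sum_map_range (((fun i => PySem.List.pyGetD demands i 0 *
    min |(c:Int) - i| ((n:Int) - |(c:Int) - i|)) ∘ (fun k : Nat => (0:Int) + (k:Int)))) n]
  simp only [Function.comp, zero_add]
  -- turn RHS into a sum over d.getD ((r+c) % n)
  unfold pvCostPhi
  have hrhs : ∑ r ∈ Finset.range n, min (r : Int) ((n : Int) - r) * (d.rotate c).getD r 0
      = ∑ r ∈ Finset.range n, min (r : Int) ((n : Int) - r) * d.getD ((r + c) % n) 0 :=
    Finset.sum_congr rfl (fun r hr => by
      rw [pv_getD_rotate d n c r (by rw [hd]; simp; omega) hn (Finset.mem_range.mp hr)])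
  rw [hrhs]
  have hmodadd : ∀ a : Nat, a < n → ((a + (n - c)) % n + c) % n = a := by
    intro a haa
    rw [Nat.mod_add_mod]
    have h2 : a + (n - c) + c = a + n := by omega
    rw [h2, Nat.add_mod_right, Nat.mod_eq_of_lt haa]
  refine Finset.sum_nbij' (i := fun a => (a + (n - c)) % n) (j := fun r => (r + c) % n)
    ?_ ?_ ?_ ?_ ?_
  · intro a ha; exact Finset.mem_range.mpr (Nat.mod_lt _ (by omega))
  · intro r hr; exact Finset.mem_range.mpr (Nat.mod_lt _ (by omega))
  · intro a ha
    exact hmodadd a (Finset.mem_range.mp ha)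
  · intro r hr
    have hrr := Finset.mem_range.mp hr
    show ((r + c) % n + (n - c)) % n = r
    rw [Nat.mod_add_mod]
    have h2 : r + c + (n - c) = r + n := by omega
    rw [h2, Nat.add_mod_right, Nat.mod_eq_of_lt hrr]
  · intro a ha
    have haa := Finset.mem_range.mp ha
    show PySem.List.pyGetD demands (a : Int) 0 * min |(c:Int) - a| ((n:Int) - |(c:Int) - a|)
      = min (((a + (n - c)) % n : Nat) : Int) ((n:Int) - ((a + (n - c)) % n : Nat))
          * d.getD (((a + (n - c)) % n + c) % n) 0
    rw [PySem.List.pyGetD_natCast demands a 0, hmodadd a haa]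
    have hgd : d.getD a 0 = demands.getD a 0 := by
      subst hd
      simp [List.getD, haa]
    rw [hgd]
    have hm : (a + (n - c)) % n = if c ≤ a then a - c else a + (n - c) := by
      split_ifs with h
      · rw [Nat.mod_eq_sub_mod (by omega)]
        have h2 : a + (n - c) - n = a - c := by omega
        rw [h2]
        exact Nat.mod_eq_of_lt (by omega)
      · exact Nat.mod_eq_of_lt (by omega)
    rw [hm]
    split_ifs with h
    · have habs : |(c:Int) - a| = (a : Int) - c := by
        rw [abs_sub_comm, abs_of_nonneg (by omega)]
      rw [habs]
      have hmin : min ((a:Int) - c) ((n:Int) - ((a:Int) - c))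
          = min (((a - c : Nat)) : Int) ((n:Int) - ((a - c : Nat))) := by omega
      rw [hmin, mul_comm]
    · have habs : |(c:Int) - a| = (c : Int) - a := by
        rw [abs_of_nonneg (by omega)]
      rw [habs]
      have hmin : min ((c:Int) - a) ((n:Int) - ((c:Int) - a))
          = min (((a + (n - c) : Nat)) : Int) ((n:Int) - ((a + (n - c) : Nat))) := by omega
      rw [hmin, mul_comm]
-- bridge: d[(c + j) % n] in the port is position j of the c-rotated list
lemma pv_mod_getD (d : List Int) (n : Nat) (hd : d.length = n) (hn : 1 ≤ n) (c j : Nat) :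
    PySem.List.pyGetD d (PySem.Int.mod ((c : Int) + (j : Int)) (n : Int)) 0
      = (d.rotate c).getD (j % n) 0 := by
  have h1 : (c : Int) + (j : Int) = (((c + j : Nat)) : Int) := by push_cast; ring
  rw [h1, PySem.Int.mod_natCast, PySem.List.pyGetD_natCast,
      pv_getD_rotate d n c (j % n) hd hn (Nat.mod_lt _ (by omega)),
      Nat.mod_add_mod, Nat.add_comm j c]

lemma pv_odd_cond (n : Nat) :
    (PySem.Int.mod ((n : Int)) 2 == 1) = decide (n % 2 = 1) := by
  have h : PySem.Int.mod ((n:Int)) 2 = ((n % 2 : Nat) : Int) := by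
    exact_mod_cast PySem.Int.mod_natCast n 2
  rcases Nat.mod_two_eq_zero_or_one n with h2 | h2 <;> rw [h, h2] <;> decide

lemma pv_L (demands d : List Int) (n : Nat) (hn : 1 ≤ n)
    (hd : d = demands.take n) (hlen : n ≤ demands.length) :
    ∀ (len : Nat) (k : Int), 1 ≤ k → k + len = (n : Int) →
    ∀ (bc bi : Int),
    ((PySem.List.pyRange k (n : Int) 1).foldl (pvStepA (n : Int) demands) (some bc, bi)).2
    = ((PySem.List.pyRange (k - 1) ((n : Int) - 1) 1).foldl
        (pvStepB (n : Int) (PySem.Int.floordiv (n : Int) 2) d.sum d)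
        (pvCostPhi n (d.rotate (k - 1).toNat), pvWin (n / 2) (d.rotate (k - 1).toNat), bc, bi)).2.2.2 := by
  have hdlen : d.length = n := by subst hd; simp; omega
  intro len
  induction len with
  | zero =>
      intro k hk1 hkn bc bi
      rw [PySem.List.pyRange_one_eq_nil (by omega), PySem.List.pyRange_one_eq_nil (by omega)]
      simp
  | succ len ih =>
      intro k hk1 hkn bc bi
      have hkN : k < (n : Int) := by omega
      have hn2 : 2 ≤ n := by omega
      rw [PySem.List.pyRange_one_cons hkN]
      rw [PySem.List.pyRange_one_cons (show k - 1 < (n : Int) - 1 by omega)]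
      simp only [List.foldl_cons]
      -- the rotated list at step k-1
      set e := d.rotate (k - 1).toNat with hedef
      have helen : e.length = n := by rw [hedef, List.length_rotate, hdlen]
      have hrot1 : e.rotate 1 = d.rotate k.toNat := by
        rw [hedef, List.rotate_rotate]
        congr 1
        omega
      have hesum : e.sum = d.sum := (List.rotate_perm d _).sum_eq
      -- A's fresh cost at city k equals the rotated profile cost
      have hcostA : pvInnerA (n : Int) demands k = pvCostPhi n (d.rotate k.toNat) := by
        have hk' : k = ((k.toNat : Nat) : Int) := by omega
        rw [hk']
        exact pv_innerA_eq demands d n hn hd hlen k.toNat (by omega)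
      -- B's m as a Nat
      have hmN : PySem.Int.floordiv (n : Int) 2 = ((n / 2 : Nat) : Int) := by
        exact_mod_cast PySem.Int.floordiv_natCast n 2
      -- the two getD-with-mod expressions of the port, at c = k - 1
      have harg1 : (k - 1) + PySem.Int.floordiv (n : Int) 2 + 1
          = (((k - 1).toNat : Nat) : Int) + (((n / 2 + 1 : Nat)) : Int) := by
        rw [hmN]; push_cast; omega
      have hget1 : PySem.List.pyGetD d (PySem.Int.mod ((k - 1) + PySem.Int.floordiv (n : Int) 2 + 1) (n : Int)) 0
          = e.getD ((n / 2 + 1) % n) 0 := by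
        rw [harg1, pv_mod_getD d n hdlen hn (k - 1).toNat (n / 2 + 1)]
      have harg2 : (k - 1) + 1 = (((k - 1).toNat : Nat) : Int) + ((1 : Nat) : Int) := by
        push_cast; omega
      have hget2 : PySem.List.pyGetD d (PySem.Int.mod ((k - 1) + 1) (n : Int)) 0
          = e.getD 1 0 := by
        rw [harg2, pv_mod_getD d n hdlen hn (k - 1).toNat 1, Nat.mod_eq_of_lt (by omega)]
      -- B's new cost equals A's fresh cost at city k
      have hcost' : pvCostPhi n e +
          (d.sum - 2 * pvWin (n / 2) e -
            (if n % 2 = 1 then e.getD ((n / 2 + 1) % n) 0 else 0))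
          = pvCostPhi n (d.rotate k.toNat) := by
        rw [← hrot1, pv_K1 e n helen hn2, hesum]
        have : (if n % 2 = 1 then e.getD ((n / 2 + 1) % n) 0 else 0)
            = (if n % 2 = 1 then e.getD (n / 2 + 1) 0 else 0) := by
          by_cases hodd : n % 2 = 1
          · rw [if_pos hodd, if_pos hodd, Nat.mod_eq_of_lt (by omega)]
          · rw [if_neg hodd, if_neg hodd]
        rw [this]; ring
      -- unfold one step of A and one step of B
      have hstepA : pvStepA (n : Int) demands (some bc, bi) k
          = if pvCostPhi n (d.rotate k.toNat) < bc
              then (some (pvCostPhi n (d.rotate k.toNat)), k + 1) else (some bc, bi) := by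
        unfold pvStepA
        simp only [hcostA]
      have hstepB : pvStepB (n : Int) (PySem.Int.floordiv (n : Int) 2) d.sum d
            (pvCostPhi n e, pvWin (n / 2) e, bc, bi) (k - 1)
          = (pvCostPhi n (d.rotate k.toNat),
             pvWin (n / 2) (d.rotate k.toNat),
             (if pvCostPhi n (d.rotate k.toNat) < bc
               then (pvCostPhi n (d.rotate k.toNat), k + 1) else (bc, bi)).1,
             (if pvCostPhi n (d.rotate k.toNat) < bc
               then (pvCostPhi n (d.rotate k.toNat), k + 1) else (bc, bi)).2) := by
        unfold pvStepB
        simp only [hget1, hget2, pv_odd_cond n]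
        have hW : pvWin (n / 2) e + e.getD ((n / 2 + 1) % n) 0 - e.getD 1 0
            = pvWin (n / 2) (d.rotate k.toNat) := by
          rw [← hrot1, pv_K2 e n helen hn2]
        have hC : pvCostPhi n e +
            (if decide (n % 2 = 1) = true
              then d.sum - 2 * pvWin (n / 2) e - e.getD ((n / 2 + 1) % n) 0
              else d.sum - 2 * pvWin (n / 2) e)
            = pvCostPhi n (d.rotate k.toNat) := by
          rw [← hcost']
          by_cases hodd : n % 2 = 1 <;> simp [hodd]
        simp only [hC, hW]
        have hk2 : k - 1 + 2 = k + 1 := by ring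
        rw [hk2]
      rw [hstepA, hstepB]
      by_cases hlt : pvCostPhi n (d.rotate k.toNat) < bc
      · simp only [if_pos hlt]
        have := ih (k + 1) (by omega) (by omega) (pvCostPhi n (d.rotate k.toNat)) (k + 1)
        simp only [add_sub_cancel_right] at this
        simpa using this
      · simp only [if_neg hlt]
        have := ih (k + 1) (by omega) (by omega) bc bi
        simp only [add_sub_cancel_right] at this
        simpa using this
lemma pv_main (N : Int) (demands : List Int) (hpre : N ≤ (demands.length : Int)) :
    find_optimal_city N demands = find_optimal_city_alt N demands := by
  unfold find_optimal_city find_optimal_city_alt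
  by_cases hN : N ≤ 0
  · rw [if_pos hN, PySem.List.pyRange_one_eq_nil hN]
    rfl
  · rw [if_neg hN]
    obtain ⟨n, rfl⟩ : ∃ n : Nat, N = (n : Int) := ⟨N.toNat, by omega⟩
    have hn : 1 ≤ n := by omega
    have hlen : n ≤ demands.length := by omega
    set d := PySem.List.slice demands none (some (n : Int)) with hddef
    have hd : d = demands.take n := by
      rw [hddef, PySem.List.slice_to _ (by positivity)]
      norm_num
    have hdlen : d.length = n := by rw [hd]; simp; omega
    -- initial cost literal = pvCostPhi n d
    have hcost0 : ((PySem.List.pyRange 0 (n : Int) 1).map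
        (fun i => PySem.List.pyGetD d i 0 * min i ((n : Int) - i))).sum = pvCostPhi n d := by
      rw [PySem.List.pyRange_one, List.map_map]
      simp only [sub_zero, Int.toNat_natCast]
      rw [pv_sum_map_range (((fun i => PySem.List.pyGetD d i 0 * min i ((n:Int) - i))
        ∘ (fun k : Nat => (0:Int) + (k:Int)))) n]
      unfold pvCostPhi
      refine Finset.sum_congr rfl (fun r hr => ?_)
      simp only [Function.comp, zero_add, PySem.List.pyGetD_natCast]
      rw [mul_comm]
    -- initial window literal = pvWin (n/2) d
    have hW0 : ((PySem.List.pyRange 1 (PySem.Int.floordiv (n : Int) 2 + 1) 1).map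
        (fun r => PySem.List.pyGetD d (PySem.Int.mod r (n : Int)) 0)).sum = pvWin (n / 2) d := by
      have hmN : PySem.Int.floordiv (n : Int) 2 = ((n / 2 : Nat) : Int) := by
        exact_mod_cast PySem.Int.floordiv_natCast n 2
      rw [hmN, PySem.List.pyRange_one, List.map_map]
      have htoNat : (((n / 2 : Nat) : Int) + 1 - 1).toNat = n / 2 := by omega
      rw [htoNat]
      rw [pv_sum_map_range (((fun r => PySem.List.pyGetD d (PySem.Int.mod r (n:Int)) 0)
        ∘ (fun k : Nat => (1:Int) + (k:Int)))) (n / 2)]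
      unfold pvWin
      refine Finset.sum_congr rfl (fun j hj => ?_)
      have hjn := Finset.mem_range.mp hj
      simp only [Function.comp]
      have h1 : (1 : Int) + (j : Int) = (((j + 1 : Nat)) : Int) := by push_cast; ring
      rw [h1, PySem.Int.mod_natCast, Nat.mod_eq_of_lt (by omega), PySem.List.pyGetD_natCast]
    -- A's first iteration
    rw [PySem.List.pyRange_one_cons (show (0:Int) < (n : Int) by omega)]
    simp only [List.foldl_cons]
    have hstep0 : pvStepA (n : Int) demands (none, 0) 0 = (some (pvCostPhi n d), 1) := by
      unfold pvStepA
      have h0 : (0 : Int) = ((0 : Nat) : Int) := rfl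
      have := pv_innerA_eq demands d n hn hd hlen 0 (by omega)
      simp only [h0, this, List.rotate_zero]
      rfl
    rw [hstep0, hcost0, hW0]
    have := pv_L demands d n hn hd hlen (n - 1) 1 (by omega) (by omega) (pvCostPhi n d) 1
    simp only [sub_self, Int.toNat_zero, List.rotate_zero] at this
    convert this using 3

-- ===== VERDICT (by name: the statement is the Claim_ definition above) =====
theorem find_optimal_city_spec : Claim_equal_find_optimal_city := by
  intro N demands _ hpre
  unfold Spec_find_optimal_city
  exact pv_main N demands hpre
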